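-- pv_equiv track=rewrite | github.com/dstephens11/orbital-mech-sim | search/refinement.py | default_refine_steps
-- ===== SOURCE A (Python) =====
-- def default_refine_steps(base_step):
--     """Build a default refinement ladder by halving cadence down to one day."""
--     steps = []
--     current = max(1, int(base_step))
--     while current > 1:
--         current = max(1, current // 2)
--         if current not in steps:
--             steps.append(current)
--         if current == 1:
--             break
--     return steps
-- ===== SOURCE B (Python) =====
-- def default_refine_steps(base_step):
--     """Build a default refinement ladder by halving cadence down to one day."""
--     n = max(1, int(base_step))
--     return [n >> i for i in range(1, n.bit_length())]
-- ===== Notes on version B (the rewrite author's own statement) =====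
-- stated objective: simpler
-- what changed: Replaces A's stateful while-loop (halve, duplicate-guard, explicit break) with computing the number of halvings up front via bit_length and returning the ladder as a single comprehension of right-shifts.
import Mathlib
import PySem

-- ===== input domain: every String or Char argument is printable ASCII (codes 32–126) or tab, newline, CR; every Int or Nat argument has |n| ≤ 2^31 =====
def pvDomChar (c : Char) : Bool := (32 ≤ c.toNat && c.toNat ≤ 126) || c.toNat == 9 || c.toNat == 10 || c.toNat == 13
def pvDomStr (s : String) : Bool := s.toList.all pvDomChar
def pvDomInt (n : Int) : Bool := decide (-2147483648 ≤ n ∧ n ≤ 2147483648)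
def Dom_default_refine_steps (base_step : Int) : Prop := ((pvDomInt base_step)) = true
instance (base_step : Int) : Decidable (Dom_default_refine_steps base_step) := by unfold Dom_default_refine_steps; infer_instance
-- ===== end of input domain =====

-- B replaces A's stateful while-loop (halve, dedup-guard, break) by computing the number of
-- halvings up front (bit_length) and mapping right-shifts over a range; objective: simpler.

-- ===== PORT A =====
def defaultRefineLoop (current : Int) (steps : List Int) : List Int :=
  if _h : 1 < current then
    let c := max 1 (PySem.Int.floordiv current 2)
    let steps' := if c ∈ steps then steps else steps ++ [c]
    if c = 1 then steps' else defaultRefineLoop c steps'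
  else steps
termination_by current.toNat
decreasing_by
  have h2 : PySem.Int.floordiv current 2 = current / 2 :=
    PySem.Int.floordiv_eq_ediv_of_pos (by omega)
  simp only [h2]
  omega

def default_refine_steps (base_step : Int) : List Int :=
  defaultRefineLoop (max 1 base_step) []

-- ===== PORT B =====
def default_refine_steps_alt (base_step : Int) : List Int :=
  let n := max 1 base_step
  (PySem.List.pyRange 1 (PySem.Int.bitLength n) 1).map (fun i => n >>> i.toNat)

-- ===== PRECONDITION & SPEC =====
def Spec_default_refine_steps (base_step : Int) (out : List Int) : Prop := out = default_refine_steps_alt base_step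
instance (base_step : Int) (out : List Int) : Decidable (Spec_default_refine_steps base_step out) := by unfold Spec_default_refine_steps; infer_instance

-- ===== CLAIM (what is proved, stated in full; the proofs are below) =====
def Claim_equal_default_refine_steps : Prop := ∀ (base_step : Int), Dom_default_refine_steps base_step → Spec_default_refine_steps base_step (default_refine_steps base_step)

-- ===== LEMMAS AND PROOFS =====

-- the halving ladder [m/2, m/4, …, 1], the common recursive description of both ports' output
def ladder (m : Nat) : List Int :=
  if _h : 2 ≤ m then ((m / 2 : Nat) : Int) :: ladder (m / 2) else []

-- A's while-loop appends exactly the ladder: every element already in `steps` is ≥ current,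
-- so the `not in steps` guard always fires (dedup guard is dead code).
theorem loop_eq_ladder (current : Int) (steps : List Int)
    (hc : 1 ≤ current) (hs : ∀ x ∈ steps, current ≤ x) :
    defaultRefineLoop current steps = steps ++ ladder current.toNat := by
  have hfd : ∀ cur : Int, 1 < cur → PySem.Int.floordiv cur 2 = cur / 2 :=
    fun cur _ => PySem.Int.floordiv_eq_ediv_of_pos (by omega)
  induction current, steps using defaultRefineLoop.induct with
  | case1 current steps h c hceq =>
    simp only [c, hfd current h] at hceq
    have hnm : (1 : Int) ∉ steps := fun hm => by have := hs 1 hm; omega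
    rw [defaultRefineLoop]
    simp only [dif_pos h, hfd current h, hceq, if_neg hnm]
    rw [ladder, dif_pos (by omega : 2 ≤ current.toNat),
        (by omega : current.toNat / 2 = 1), ladder]
    simp
  | case2 current steps h c steps' hne ih =>
    simp only [c, hfd current h, (by omega : max 1 (current / 2) = current / 2)]
      at hne
    have hnm : current / 2 ∉ steps := fun hm => by have := hs _ hm; omega
    simp only [steps', c, hfd current h,
      (by omega : max 1 (current / 2) = current / 2), dif_neg hnm] at ih
    rw [defaultRefineLoop]
    simp only [dif_pos h, hfd current h,
      (by omega : max 1 (current / 2) = current / 2), if_neg hnm, if_neg hne]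
    have hlad : ladder current.toNat = (current / 2) :: ladder (current / 2).toNat := by
      rw [ladder, dif_pos (by omega : 2 ≤ current.toNat),
          (by omega : ((current.toNat / 2 : Nat) : Int) = current / 2),
          (by omega : current.toNat / 2 = (current / 2).toNat)]
    rw [hlad, ih (by omega) (by
      intro x hx
      rcases List.mem_append.1 hx with hx | hx
      · have := hs x hx; omega
      · simp at hx; omega)]
    simp
  | case3 current steps h =>
    rw [defaultRefineLoop, ladder, dif_neg h, dif_neg (by omega)]
    simp

-- B's range-of-shifts is the ladder too: bit_length counts the halvings, and n >> (k+1) = (n//2) >> k.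
theorem alt_eq_ladder (m : Nat) (n : Int) (hm : n.toNat = m) (hn : 1 ≤ n) :
    (PySem.List.pyRange 1 (PySem.Int.bitLength n) 1).map (fun i => n >>> i.toNat)
      = ladder n.toNat := by
  induction m using Nat.strong_induction_on generalizing n with
  | _ m ih =>
  by_cases h2 : 2 ≤ n
  · have hf : PySem.Int.floordiv n 2 = n / 2 :=
      PySem.Int.floordiv_eq_ediv_of_pos (by omega)
    have hbl : PySem.Int.bitLength n = PySem.Int.bitLength (n / 2) + 1 := by
      rw [PySem.Int.bitLength_of_pos (by omega), hf]
    have hpos2 : 1 ≤ PySem.Int.bitLength (n / 2) := by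
      have := PySem.Int.bitLength_of_pos (show (0:Int) < n / 2 by omega); omega
    have hIH := ih (n / 2).toNat (by omega) (n / 2) rfl (by omega)
    have hlad : ladder n.toNat = (n / 2) :: ladder (n / 2).toNat := by
      rw [ladder, dif_pos (by omega : 2 ≤ n.toNat),
          (by omega : ((n.toNat / 2 : Nat) : Int) = n / 2),
          (by omega : n.toNat / 2 = (n / 2).toNat)]
    rw [hlad, ← hIH, PySem.List.pyRange_one, PySem.List.pyRange_one, hbl]
    rw [show (((PySem.Int.bitLength (n/2) + 1 : Nat) : Int) - 1).toNat
          = (PySem.Int.bitLength (n/2) - 1) + 1 by omega,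
        List.range_succ_eq_map,
        show (((PySem.Int.bitLength (n/2) : Nat) : Int) - 1).toNat
          = PySem.Int.bitLength (n/2) - 1 by omega]
    simp only [List.map_cons, List.map_map]
    refine List.cons_eq_cons.mpr ⟨?_, ?_⟩
    · have h1 : ((1:Int) + ((0:Nat):Int)).toNat = 1 := by omega
      simp only [h1]
      rw [Int.shiftRight_natCast_right, Int.shiftRight_eq_div_pow]
      norm_num
    · apply List.map_congr_left
      intro k _
      simp only [Function.comp_apply]
      rw [show ((1:Int) + ((k.succ : Nat) : Int)).toNat = k + 2 by omega,
          show ((1:Int) + ((k : Nat) : Int)).toNat = k + 1 by omega,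
          Int.shiftRight_natCast_right, Int.shiftRight_natCast_right,
          Int.shiftRight_eq_div_pow, Int.shiftRight_eq_div_pow,
          show (((2:Nat)^(k+2) : Nat) : Int) = 2 * (((2:Nat)^(k+1) : Nat) : Int) by push_cast; ring,
          ← Int.ediv_ediv_of_nonneg (by omega : (0:Int) ≤ 2)]
  · have h1 : n = 1 := by omega
    subst h1
    rw [show PySem.Int.bitLength (1:Int) = 1 from by decide,
        PySem.List.pyRange_one, ladder]
    simp

-- ===== VERDICT (by name: the statement is the Claim_ definition above) =====
theorem default_refine_steps_spec : Claim_equal_default_refine_steps := by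
  intro base_step _
  unfold Spec_default_refine_steps default_refine_steps default_refine_steps_alt
  rw [loop_eq_ladder _ _ (le_max_left _ _) (by simp),
      alt_eq_ladder (max 1 base_step).toNat _ rfl (le_max_left _ _)]
  simp
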